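-- pv_equiv track=rewrite | github.com/xiaotai-yang/mixed-topo | domain_wall_renyi_exact.py | region_plaquettes
-- ===== SOURCE A (Python) =====
-- def region_plaquettes(regionEdges, all_plaq):
--     """
--     For a given set of allowed edges (regionEdges), return the list of plaquettes
--     (by their top-left coordinate) that are partially contained in the region.
--     """
--     plaq = []
--     for (r, c) in all_plaq:
--         edges = [((r, c), 'H'),
--                  ((r + 1, c), 'H'),
--                  ((r, c), 'V'),
--                  ((r, c + 1), 'V')]
--         if any(e in regionEdges for e in edges):
--             plaq.append((r, c))
--     return plaq
-- ===== SOURCE B (Python) =====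
-- def region_plaquettes(regionEdges, all_plaq):
--     """Build the set of plaquettes owning some region edge, then filter all_plaq."""
--     touched = set()
--     for (i, j), t in regionEdges:
--         if t == 'H':
--             touched.add((i, j))
--             touched.add((i - 1, j))
--         elif t == 'V':
--             touched.add((i, j))
--             touched.add((i, j - 1))
--     return [p for p in all_plaq if p in touched]
-- ===== Notes on version B (the rewrite author's own statement) =====
-- stated objective: faster
-- what changed: Instead of testing each plaquette's 4 edges against regionEdges (a linear scan per test), B makes one pass over regionEdges building a hash set of the plaquette coordinates each edge touches, then filters all_plaq by set membership.
import Mathlib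
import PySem

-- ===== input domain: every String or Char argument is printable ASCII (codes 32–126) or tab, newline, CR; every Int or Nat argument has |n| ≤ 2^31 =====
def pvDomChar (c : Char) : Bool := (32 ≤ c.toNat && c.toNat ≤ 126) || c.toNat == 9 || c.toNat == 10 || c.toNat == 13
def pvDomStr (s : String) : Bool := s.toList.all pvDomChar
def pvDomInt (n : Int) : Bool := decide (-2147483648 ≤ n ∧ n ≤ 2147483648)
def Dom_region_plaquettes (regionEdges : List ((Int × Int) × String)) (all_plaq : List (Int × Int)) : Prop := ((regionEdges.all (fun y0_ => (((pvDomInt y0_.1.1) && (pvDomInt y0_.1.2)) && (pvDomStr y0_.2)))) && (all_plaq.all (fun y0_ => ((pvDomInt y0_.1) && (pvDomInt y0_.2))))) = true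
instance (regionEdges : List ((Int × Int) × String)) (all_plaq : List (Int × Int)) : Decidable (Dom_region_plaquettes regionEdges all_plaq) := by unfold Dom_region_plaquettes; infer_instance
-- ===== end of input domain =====

-- B replaces A's per-plaquette scan of regionEdges by one pass over regionEdges
-- building a set of touched plaquette coordinates, then a membership filter (faster).


-- ===== PORT A =====
def region_plaquettes (regionEdges : List ((Int × Int) × String)) (all_plaq : List (Int × Int)) : List (Int × Int) :=
  all_plaq.foldl (fun plaq p =>
    let edges : List ((Int × Int) × String) :=
      [((p.1, p.2), "H"), ((p.1 + 1, p.2), "H"), ((p.1, p.2), "V"), ((p.1, p.2 + 1), "V")]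
    if edges.any (fun e => regionEdges.contains e) then plaq ++ [(p.1, p.2)] else plaq) []

-- ===== PORT B =====
def rpTouched (regionEdges : List ((Int × Int) × String)) : PySem.Set (Int × Int) :=
  regionEdges.foldl (fun s e =>
    if e.2 = "H" then PySem.Set.add (PySem.Set.add s (e.1.1, e.1.2)) (e.1.1 - 1, e.1.2)
    else if e.2 = "V" then PySem.Set.add (PySem.Set.add s (e.1.1, e.1.2)) (e.1.1, e.1.2 - 1)
    else s) PySem.Set.empty

def region_plaquettes_alt (regionEdges : List ((Int × Int) × String)) (all_plaq : List (Int × Int)) : List (Int × Int) :=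
  all_plaq.filter (fun p => PySem.Set.contains (rpTouched regionEdges) p)

-- ===== PRECONDITION & SPEC =====
def Spec_region_plaquettes (regionEdges : List ((Int × Int) × String)) (all_plaq : List (Int × Int)) (out : List (Int × Int)) : Prop := out = region_plaquettes_alt regionEdges all_plaq
instance (regionEdges : List ((Int × Int) × String)) (all_plaq : List (Int × Int)) (out : List (Int × Int)) : Decidable (Spec_region_plaquettes regionEdges all_plaq out) := by unfold Spec_region_plaquettes; infer_instance

-- ===== CLAIM (what is proved, stated in full; the proofs are below) =====
def Claim_equal_region_plaquettes : Prop := ∀ (regionEdges : List ((Int × Int) × String)) (all_plaq : List (Int × Int)), Dom_region_plaquettes regionEdges all_plaq → Spec_region_plaquettes regionEdges all_plaq (region_plaquettes regionEdges all_plaq)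

-- ===== LEMMAS AND PROOFS =====

-- membership in the touched set built by B's fold
theorem mem_rpTouched_fold (R : List ((Int × Int) × String)) (s : PySem.Set (Int × Int)) (p : Int × Int) :
    (p ∈ R.foldl (fun s e =>
      if e.2 = "H" then PySem.Set.add (PySem.Set.add s (e.1.1, e.1.2)) (e.1.1 - 1, e.1.2)
      else if e.2 = "V" then PySem.Set.add (PySem.Set.add s (e.1.1, e.1.2)) (e.1.1, e.1.2 - 1)
      else s) s) ↔
    (p ∈ s ∨ ∃ e ∈ R,
      (e.2 = "H" ∧ (p = (e.1.1, e.1.2) ∨ p = (e.1.1 - 1, e.1.2))) ∨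
      (e.2 ≠ "H" ∧ e.2 = "V" ∧ (p = (e.1.1, e.1.2) ∨ p = (e.1.1, e.1.2 - 1)))) := by
  induction R generalizing s with
  | nil => simp
  | cons e R ih =>
    simp only [List.foldl_cons, ih]
    by_cases hH : e.2 = "H"
    · simp [hH, PySem.Set.mem_add, or_assoc]
    · by_cases hV : e.2 = "V"
      · simp [hV, PySem.Set.mem_add, or_assoc]
      · simp [hH, hV]

theorem mem_rpTouched (R : List ((Int × Int) × String)) (p : Int × Int) :
    (p ∈ rpTouched R) ↔
      (((p.1, p.2), ("H" : String)) ∈ R ∨ ((p.1 + 1, p.2), ("H" : String)) ∈ R ∨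
       ((p.1, p.2), ("V" : String)) ∈ R ∨ ((p.1, p.2 + 1), ("V" : String)) ∈ R) := by
  rw [rpTouched, mem_rpTouched_fold]
  constructor
  · rintro (h | ⟨e, he, ⟨hH, (rfl | rfl)⟩ | ⟨_, hV, (rfl | rfl)⟩⟩)
    · simp [PySem.Set.empty] at h
    · left; simpa [← hH] using he
    · right; left; simpa [← hH] using he
    · right; right; left; simpa [← hV] using he
    · right; right; right; simpa [← hV] using he
  · rintro (h | h | h | h)
    · exact Or.inr ⟨((p.1, p.2), "H"), h, Or.inl ⟨rfl, Or.inl rfl⟩⟩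
    · exact Or.inr ⟨((p.1 + 1, p.2), "H"), h, Or.inl ⟨rfl, Or.inr (by simp)⟩⟩
    · exact Or.inr ⟨((p.1, p.2), "V"), h, Or.inr ⟨by simp, rfl, Or.inl rfl⟩⟩
    · exact Or.inr ⟨((p.1, p.2 + 1), "V"), h, Or.inr ⟨by simp, rfl, Or.inr (by simp)⟩⟩

-- ===== VERDICT (by name: the statement is the Claim_ definition above) =====
theorem region_plaquettes_spec : Claim_equal_region_plaquettes := by
  intro R all _
  show region_plaquettes R all = region_plaquettes_alt R all
  rw [region_plaquettes, region_plaquettes_alt,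
    PySem.List.foldl_append_if (f := fun p : Int × Int => (p.1, p.2))]
  simp only [List.nil_append]
  have hmap : ∀ l : List (Int × Int), l.map (fun p => (p.1, p.2)) = l := by
    intro l; simp
  rw [hmap]
  apply List.filter_congr
  intro p _
  rw [Bool.eq_iff_iff]
  simp only [List.any_eq_true, List.mem_cons, List.not_mem_nil, or_false,
    PySem.Set.contains_iff, mem_rpTouched]
  constructor
  · rintro ⟨e, (rfl | rfl | rfl | rfl), he⟩ <;> simp_all
  · rintro (h | h | h | h)
    · exact ⟨((p.1, p.2), "H"), Or.inl rfl, by simpa using h⟩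
    · exact ⟨((p.1 + 1, p.2), "H"), Or.inr (Or.inl rfl), by simpa using h⟩
    · exact ⟨((p.1, p.2), "V"), Or.inr (Or.inr (Or.inl rfl)), by simpa using h⟩
    · exact ⟨((p.1, p.2 + 1), "V"), Or.inr (Or.inr (Or.inr rfl)), by simpa using h⟩
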